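-- pv_equiv track=rewrite | github.com/owebeeone/ardoinus | ardoExtract/extract.py | escapeCmd
-- ===== SOURCE A (Python) =====
-- def escapeCmd(cmd):
--     t = []
--     state = 0
--     for c in cmd:
--         if c == "'":
--             if state == 0:
--                 state = 1
--             else:
--                 state = 0
--             t.append('"')
--         elif c == '"':
--             if state == 1:
--                 t.append('\\"')
--             else:
--                 t.append('"')
--         elif c == '\\':
--             t.append('\\')
--         else:
--             t.append(c)
--     return ''.join(t)
-- ===== SOURCE B (Python) =====
-- def escapeCmd(cmd):
--     parts = cmd.split("'")
--     return '"'.join(p.replace('"', '\\"') if i % 2 else p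
--                     for i, p in enumerate(parts))
-- ===== Notes on version B (the rewrite author's own statement) =====
-- stated objective: faster
-- what changed: Replaced the per-character quote state machine by a split-on-single-quote decomposition: odd-indexed segments (those inside quotes) get their double quotes escaped via str.replace and the segments are rejoined with a double quote, moving all character work into C-level split/replace/join.
import Mathlib
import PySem

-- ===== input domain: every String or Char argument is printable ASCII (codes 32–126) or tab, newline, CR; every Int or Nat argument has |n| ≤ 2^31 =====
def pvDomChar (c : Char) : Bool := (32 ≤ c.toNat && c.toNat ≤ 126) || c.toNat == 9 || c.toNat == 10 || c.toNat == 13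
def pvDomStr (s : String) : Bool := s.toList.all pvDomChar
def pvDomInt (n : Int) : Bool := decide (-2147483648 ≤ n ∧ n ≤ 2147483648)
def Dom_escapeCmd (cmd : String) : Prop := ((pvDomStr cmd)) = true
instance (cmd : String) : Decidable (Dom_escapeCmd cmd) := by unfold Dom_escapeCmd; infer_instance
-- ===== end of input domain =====

-- B replaces A's per-character quote state machine by a split-on-'\'' decomposition
-- (odd segments escaped via replace, rejoined); same O(n), measured faster in Python.

-- ===== PORT A =====
-- literal port of A: fold over the characters with state ∈ {0,1} and the list t
-- of appended string pieces, joined by '' at the end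
def escapeCmd (cmd : String) : String :=
  let r := cmd.toList.foldl (fun (st : Int × List (List Char)) c =>
    if c = '\'' then
      ((if st.1 = 0 then 1 else 0), st.2 ++ [['"']])
    else if c = '"' then
      (st.1, st.2 ++ [if st.1 = 1 then ['\\', '"'] else ['"']])
    else if c = '\\' then
      (st.1, st.2 ++ [['\\']])
    else
      (st.1, st.2 ++ [[c]])) ((0 : Int), ([] : List (List Char)))
  String.mk (PySem.Chars.join [] r.2)

-- ===== PORT B =====
-- literal port of B: split on "'", escape '"' in odd-indexed segments, join with '"'
def escapeCmd_alt (cmd : String) : String :=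
  let parts := PySem.Chars.splitOn cmd.toList ['\'']
  String.mk (PySem.Chars.join ['"']
    ((parts.zipIdx).map (fun pi =>
      if pi.2 % 2 = 1 then PySem.Chars.replace pi.1 ['"'] ['\\', '"'] else pi.1)))

-- ===== PRECONDITION & SPEC =====
def Spec_escapeCmd (cmd : String) (out : String) : Prop := out = escapeCmd_alt cmd
instance (cmd : String) (out : String) : Decidable (Spec_escapeCmd cmd out) := by unfold Spec_escapeCmd; infer_instance

-- ===== CLAIM (what is proved, stated in full; the proofs are below) =====
def Claim_equal_escapeCmd : Prop := ∀ (cmd : String), Dom_escapeCmd cmd → Spec_escapeCmd cmd (escapeCmd cmd)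

-- ===== LEMMAS AND PROOFS =====

-- common specification: the escaped text from a given in-quotes flag
def pvE (b : Bool) : List Char → List Char
  | [] => []
  | c :: cs =>
    if c = '\'' then '"' :: pvE (!b) cs
    else if c = '"' then (if b then ['\\', '"'] else ['"']) ++ pvE b cs
    else c :: pvE b cs

-- structural form of splitting on a single quote character
def pvSplit : List Char → List (List Char)
  | [] => [[]]
  | c :: cs => if c = '\'' then [] :: pvSplit cs else (pvSplit cs).modifyHead (c :: ·)

-- structural form of replacing '"' by '\\"'
def pvRep : List Char → List Char
  | [] => []
  | c :: cs => if c = '"' then '\\' :: '"' :: pvRep cs else c :: pvRep cs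

-- B's mapped segments, as a structural recursion on the parts with a parity flag
def pvParts (b : Bool) : List (List Char) → List (List Char)
  | [] => []
  | p :: ps => (if b then pvRep p else p) :: pvParts (!b) ps

lemma pv_join_nil_flatten (l : List (List Char)) :
    PySem.Chars.join [] l = l.flatten := by
  induction l with
  | nil => simp [PySem.Chars.join_nil]
  | cons p ps ih =>
    cases ps with
    | nil => simp [PySem.Chars.join_singleton]
    | cons q rest => rw [PySem.Chars.join_cons_cons]; simp [ih]

-- join over a list whose head is split as u ++ v
lemma pv_join_head (sep u v : List Char) (ps : List (List Char)) :
    PySem.Chars.join sep ((u ++ v) :: ps) = u ++ PySem.Chars.join sep (v :: ps) := by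
  cases ps with
  | nil => simp [PySem.Chars.join_singleton]
  | cons q rest => rw [PySem.Chars.join_cons_cons, PySem.Chars.join_cons_cons]; simp

-- ===== A-side: the fold computes pvE =====

lemma pv_A_loop (cs : List Char) (st : Int) (t : List (List Char)) (h : st = 0 ∨ st = 1) :
    ((cs.foldl (fun (st : Int × List (List Char)) c =>
      if c = '\'' then
        ((if st.1 = 0 then 1 else 0), st.2 ++ [['"']])
      else if c = '"' then
        (st.1, st.2 ++ [if st.1 = 1 then ['\\', '"'] else ['"']])
      else if c = '\\' then
        (st.1, st.2 ++ [['\\']])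
      else
        (st.1, st.2 ++ [[c]])) (st, t)).2).flatten
    = t.flatten ++ pvE (decide (st = 1)) cs := by
  induction cs generalizing st t with
  | nil => simp [pvE]
  | cons c cs ih =>
    rcases h with h | h <;> subst h <;>
      by_cases hc : c = '\'' <;> by_cases hq : c = '"' <;> by_cases hb : c = '\\' <;>
        simp [List.foldl_cons, hc, hq, hb, pvE,
          ih _ _ (Or.inl rfl), ih _ _ (Or.inr rfl)]

-- ===== B-side: splitOn / replace / zipIdx-map reduce to the structural forms =====

lemma pv_split_ne_nil (l : List Char) : pvSplit l ≠ [] := by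
  cases l with
  | nil => simp [pvSplit]
  | cons c cs =>
    by_cases hc : c = '\'' <;> simp [pvSplit, hc] <;>
      cases h2 : pvSplit cs <;> simp_all [pv_split_ne_nil cs]

lemma pv_splitOn_go (l : List Char) : ∀ (fuel : Nat) (cur : List Char) (acc : List (List Char)),
    l.length < fuel →
    PySem.Chars.splitOn.go ['\''] fuel l cur acc
      = acc.reverse ++ (pvSplit l).modifyHead (cur.reverse ++ ·) := by
  induction l with
  | nil =>
    intro fuel cur acc h
    cases fuel with
    | zero => omega
    | succ f => simp [PySem.Chars.splitOn.go, pvSplit]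
  | cons c cs ih =>
    intro fuel cur acc h
    cases fuel with
    | zero => omega
    | succ f =>
      rw [PySem.Chars.splitOn.go]
      by_cases hc : c = '\''
      · subst hc
        simp only [List.isPrefixOf, beq_self_eq_true, Bool.true_and, if_pos,
          List.length_singleton, List.drop_succ_cons, List.drop_zero]
        rw [ih f [] (cur.reverse :: acc) (by simp at h; omega)]
        simp [pvSplit, List.modifyHead]
        cases pvSplit cs <;> rfl
      · have hpre : (['\''].isPrefixOf (c :: cs)) = false := by
          simp [List.isPrefixOf]; exact fun hx => (hc hx.symm).elim
        rw [hpre]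
        simp only [Bool.false_eq_true, if_neg, not_false_iff]
        rw [ih f (c :: cur) acc (by simp at h; omega)]
        cases hq : pvSplit cs with
        | nil => exact absurd hq (pv_split_ne_nil cs)
        | cons q qs =>
          simp [pvSplit, hc, hq, List.modifyHead]

lemma pv_splitOn_eq (l : List Char) : PySem.Chars.splitOn l ['\''] = pvSplit l := by
  rw [PySem.Chars.splitOn, pv_splitOn_go l (l.length + 1) [] [] (by omega)]
  cases hq : pvSplit l with
  | nil => exact absurd hq (pv_split_ne_nil l)
  | cons q qs => simp [List.modifyHead]

lemma pv_replace_go (l : List Char) : ∀ (fuel : Nat) (acc : List Char),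
    l.length ≤ fuel →
    PySem.Chars.replace.go ['"'] ['\\', '"'] fuel l acc = acc.reverse ++ pvRep l := by
  induction l with
  | nil =>
    intro fuel acc h
    cases fuel <;> simp [PySem.Chars.replace.go, pvRep]
  | cons c cs ih =>
    intro fuel acc h
    cases fuel with
    | zero => simp at h
    | succ f =>
      rw [PySem.Chars.replace.go]
      by_cases hq : c = '"'
      · subst hq
        simp only [List.isPrefixOf, beq_self_eq_true, Bool.true_and,
          List.isPrefixOf_nil_left, if_pos, List.length_singleton, List.drop_succ_cons, List.drop_zero]
        rw [ih f _ (by simp at h; omega)]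
        simp [pvRep]
      · have hpre : (['"'].isPrefixOf (c :: cs)) = false := by
          simp [List.isPrefixOf]; exact fun hx => (hq hx.symm).elim
        rw [hpre]
        simp only [Bool.false_eq_true, if_neg, not_false_iff]
        rw [ih f _ (by simp at h; omega)]
        simp [pvRep, hq]

lemma pv_replace_eq (p : List Char) :
    PySem.Chars.replace p ['"'] ['\\', '"'] = pvRep p := by
  rw [PySem.Chars.replace]
  simp only [List.isEmpty]
  rw [pv_replace_go p p.length [] (le_refl _)]
  simp

lemma pv_zipIdx_map (ps : List (List Char)) : ∀ (n : Nat),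
    (ps.zipIdx n).map (fun pi =>
      if pi.2 % 2 = 1 then PySem.Chars.replace pi.1 ['"'] ['\\', '"'] else pi.1)
    = pvParts (decide (n % 2 = 1)) ps := by
  induction ps with
  | nil => intro n; simp [pvParts]
  | cons p ps ih =>
    intro n
    rw [List.zipIdx_cons, List.map_cons, ih (n+1)]
    by_cases hn : n % 2 = 1
    · have h1 : (n + 1) % 2 = 0 := by omega
      simp [pvParts, hn, h1, pv_replace_eq]
    · have h1 : (n + 1) % 2 = 1 := by omega
      simp [pvParts, hn, h1, pv_replace_eq]

lemma pv_parts_ne_nil (b : Bool) (ps : List (List Char)) (h : ps ≠ []) : pvParts b ps ≠ [] := by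
  cases ps with
  | nil => exact absurd rfl h
  | cons p ps => simp [pvParts]

lemma pv_B_main (l : List Char) : ∀ (b : Bool),
    PySem.Chars.join ['"'] (pvParts b (pvSplit l)) = pvE b l := by
  induction l with
  | nil =>
    intro b
    cases b <;> simp [pvSplit, pvParts, pvRep, pvE, PySem.Chars.join_singleton]
  | cons c cs ih =>
    intro b
    by_cases hc : c = '\''
    · subst hc
      have hne := pv_parts_ne_nil (!b) _ (pv_split_ne_nil cs)
      obtain ⟨q, qs, hq⟩ := List.exists_cons_of_ne_nil hne
      have hhead : (if b then pvRep [] else ([] : List Char)) = [] := by cases b <;> simp [pvRep]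
      rw [pvSplit]
      simp only [if_pos]
      rw [pvParts, hhead, hq, PySem.Chars.join_cons_cons]
      rw [← hq, ih (!b)]
      simp [pvE]
    · obtain ⟨q, qs, hq⟩ := List.exists_cons_of_ne_nil (pv_split_ne_nil cs)
      rw [pvSplit]
      simp only [hc, if_neg, not_false_iff, hq, List.modifyHead]
      have hhead : (if b then pvRep (c :: q) else (c :: q))
          = (if b ∧ c = '"' then ['\\', '"'] else [c]) ++ (if b then pvRep q else q) := by
        cases b <;> by_cases hcq : c = '"' <;> simp [pvRep, hcq]
      rw [pvParts, hhead, pv_join_head]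
      have : (if b then pvRep q else q) :: pvParts (!b) qs = pvParts b (q :: qs) := by
        rw [pvParts]
      rw [this, ← hq, ih b]
      by_cases hcq : c = '"' <;> cases b <;> simp [pvE, hc, hcq]

-- ===== VERDICT (by name: the statement is the Claim_ definition above) =====
theorem escapeCmd_spec : Claim_equal_escapeCmd := by
  intro cmd _
  unfold Spec_escapeCmd escapeCmd escapeCmd_alt
  simp only [pv_splitOn_eq, pv_zipIdx_map, pv_join_nil_flatten]
  rw [pv_A_loop _ _ _ (Or.inl rfl)]
  simp [pv_B_main]
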